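-- pv_equiv track=rewrite | github.com/TaekyungAn/Programmers_Algorithm | 숭실대/Day2. Array,List,Map,Set/2-3.신고결과받기.py | solution
-- ===== SOURCE A (Python) =====
-- def solution(id_list, reports, k):
--     reported = {id: set() for id in id_list}  # 각 id에 대한 신고한 사용자 목록을 저장할 딕셔너리
--     # 위 코드가 어렵다면 아래 코드를 사용하셔도 됩니다.
--     # reported = {}
--     # for id in id_list:
--     #     reported[id] = set()
--
--     report_count = {id: 0 for id in id_list}  # 각 id가 몇 번 메일을 받아야 하는지 저장할 딕셔너리
--     # 위 코드가 어렵다면 아래 코드를 사용하셔도 됩니다.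
--     # report_count = {}
--     # for id in id_list:
--     #     report_count[id] = 0
--
--     # 중복된 신고를 제거한 후, 각 신고에 대하여 반복문을 실행합니다.
--     for i in set(reports):
--         # 신고를 공백으로 분리하여 report라는 리스트에 저장합니다.
--         reporter, reported_id = i.split(' ')
--         # 신고한 사용자의 id를 key로 사용하여, 신고받은 사용자의 id를 reported에 추가합니다.
--         reported[reported_id].add(reporter)
--
--     # 각 id에 대하여 신고한 사용자 목록을 확인하며, k 이상인 경우 report_count를 증가시킵니다.
--     for reported_id, reporters in reported.items():
--         if len(reporters) >= k:
--             for reporter in reporters: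
--                 report_count[reporter] += 1
--
--     # report_count의 값을 answer 리스트로 변환하여 반환합니다.
--     return [report_count[id] for id in id_list]
-- ===== SOURCE B (Python) =====
-- def solution(id_list, reports, k):
--     distinct = set(reports)
--     recv = {i: 0 for i in id_list}
--     for r in distinct:
--         reporter, target = r.split(' ')
--         recv[target] += 1
--     banned = {i for i, c in recv.items() if c >= k}
--     answer = {i: 0 for i in id_list}
--     for r in distinct:
--         reporter, target = r.split(' ')
--         if target in banned:
--             answer[reporter] += 1
--     return [answer[i] for i in id_list]
-- ===== Notes on version B (the rewrite author's own statement) =====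
-- stated objective: alternative
-- what changed: Replaces A's dict of per-target reporter sets and nested loop over grouped reporter sets with a flat count table over distinct reports, a banned set, and a second flat re-scan of the distinct reports.
import Mathlib
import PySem

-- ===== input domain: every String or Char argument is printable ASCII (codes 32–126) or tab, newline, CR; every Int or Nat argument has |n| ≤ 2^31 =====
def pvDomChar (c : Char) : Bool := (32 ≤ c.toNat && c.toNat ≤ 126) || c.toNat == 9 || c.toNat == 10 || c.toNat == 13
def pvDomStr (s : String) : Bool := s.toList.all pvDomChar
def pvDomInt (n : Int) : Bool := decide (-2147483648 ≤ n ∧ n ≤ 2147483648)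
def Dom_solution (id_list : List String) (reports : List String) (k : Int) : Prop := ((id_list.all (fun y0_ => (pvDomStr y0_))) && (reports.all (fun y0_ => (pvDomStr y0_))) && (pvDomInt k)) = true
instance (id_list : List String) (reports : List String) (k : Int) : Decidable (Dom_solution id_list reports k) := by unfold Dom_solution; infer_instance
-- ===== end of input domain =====

-- B replaces A's dict of per-target reporter sets (and its nested loop over grouped
-- reporter sets) by a flat count table over distinct reports, a banned set, and a
-- second flat re-scan of the distinct reports (objective: alternative decomposition).

-- ===== PORT A =====
def solution (id_list : List String) (reports : List String) (k : Int) : List Int :=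
  -- reported = {id: set() for id in id_list}
  let reported : PySem.Dict String (PySem.Set String) :=
    id_list.foldl (fun d id => d.insert id PySem.Set.empty) PySem.Dict.empty
  -- report_count = {id: 0 for id in id_list}
  let report_count : PySem.Dict String Int :=
    id_list.foldl (fun d id => d.insert id (0 : Int)) PySem.Dict.empty
  -- for i in set(reports): reporter, reported_id = i.split(' '); reported[reported_id].add(reporter)
  -- (unpacking fails / key missing = ValueError / KeyError in Python: excluded by Pre_, the
  --  port then leaves the state unchanged / modify's default is never hit inside Pre_)
  let reported :=
    (PySem.Set.ofList reports).foldl (fun d i =>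
      match PySem.Str.split? i " " with
      | some [reporter, reported_id] =>
          d.modify reported_id PySem.Set.empty (fun s => s.add reporter)
      | _ => d) reported
  -- for reported_id, reporters in reported.items(): if len(reporters) >= k: for reporter in reporters: report_count[reporter] += 1
  let report_count :=
    reported.items.foldl (fun c p =>
      if k ≤ PySem.Set.len p.2 then
        p.2.foldl (fun c reporter => c.modify reporter 0 (· + 1)) c
      else c) report_count
  -- return [report_count[id] for id in id_list]
  id_list.map (fun id => report_count.getD id 0)

-- ===== PORT B =====
def solution_alt (id_list : List String) (reports : List String) (k : Int) : List Int :=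
  let distinct := PySem.Set.ofList reports
  -- recv = {i: 0 for i in id_list}; for r in distinct: _, target = r.split(' '); recv[target] += 1
  let recv : PySem.Dict String Int :=
    id_list.foldl (fun d i => d.insert i (0 : Int)) PySem.Dict.empty
  let recv :=
    distinct.foldl (fun d r =>
      (PySem.Str.split? r " ").elim d (fun parts =>
        if parts.length = 2 then d.modify (parts.getD 1 "") 0 (· + 1) else d)) recv
  -- banned = {i for i, c in recv.items() if c >= k}
  let banned : PySem.Set String :=
    recv.items.foldl (fun s p => if k ≤ p.2 then s.add p.1 else s) PySem.Set.empty
  -- answer = {i: 0 for i in id_list}; for r in distinct: reporter, target = r.split(' ');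
  --   if target in banned: answer[reporter] += 1
  let answer : PySem.Dict String Int :=
    id_list.foldl (fun d i => d.insert i (0 : Int)) PySem.Dict.empty
  let answer :=
    distinct.foldl (fun d r =>
      (PySem.Str.split? r " ").elim d (fun parts =>
        if parts.length = 2 then
          (if banned.contains (parts.getD 1 "") then d.modify (parts.getD 0 "") 0 (· + 1)
           else d)
        else d)) answer
  -- return [answer[i] for i in id_list]
  id_list.map (fun i => answer.getD i 0)

-- ===== PRECONDITION & SPEC =====
-- r.split(' ') when it yields exactly two pieces
def pvParse (r : String) : Option (String × String) :=
  (PySem.Str.split? r " ").bind (fun parts =>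
    if parts.length = 2 then some (parts.getD 0 "", parts.getD 1 "") else none)

-- number of distinct reports whose second piece is q (= distinct reporters of q)
def pvNumRep (reports : List String) (q : String) : Nat :=
  (((PySem.Set.ofList reports).filterMap pvParse).filter (fun p => p.2 == q)).length

def pvPreOK (id_list : List String) (reports : List String) (k : Int) (r : String) : Bool :=
  match pvParse r with
  | some (a, b) =>
      decide (b ∈ id_list) && (decide (a ∈ id_list) || !decide (k ≤ (pvNumRep reports b : Int)))
  | none => false

-- Pre_ excludes exactly the inputs where the Python A raises: a report that does not split
-- into exactly two pieces (ValueError), a reported id not in id_list (KeyError), and a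
-- reporter not in id_list whose target gathers at least k distinct reporters (KeyError).
def Pre_solution (id_list : List String) (reports : List String) (k : Int) : Prop :=
  ∀ r ∈ reports, pvPreOK id_list reports k r = true
instance (id_list : List String) (reports : List String) (k : Int) : Decidable (Pre_solution id_list reports k) := by unfold Pre_solution; infer_instance

def pvWitness_solution : List String × List String × Int :=
  (["muzi", "frodo", "apeach", "neo"],
   ["muzi frodo", "apeach frodo", "frodo neo", "muzi neo", "apeach muzi"], 2)

def Spec_solution (id_list : List String) (reports : List String) (k : Int) (out : List Int) : Prop := out = solution_alt id_list reports k
instance (id_list : List String) (reports : List String) (k : Int) (out : List Int) : Decidable (Spec_solution id_list reports k out) := by unfold Spec_solution; infer_instance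

-- ===== CLAIM (what is proved, stated in full; the proofs are below) =====
def Claim_equal_solution : Prop := ∀ (id_list : List String) (reports : List String) (k : Int), Dom_solution id_list reports k → Pre_solution id_list reports k → Spec_solution id_list reports k (solution id_list reports k)

-- ===== LEMMAS AND PROOFS =====
theorem pv_join_cons_ne_nil (sep x : List Char) (ys : List (List Char)) (h : ys ≠ []) :
    PySem.Chars.join sep (x :: ys) = x ++ sep ++ PySem.Chars.join sep ys := by
  cases ys with
  | nil => exact absurd rfl h
  | cons y t => exact PySem.Chars.join_cons_cons sep x y t

theorem pv_join_merge (sep : List Char) (xs : List (List Char)) (u v : List Char) :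
    PySem.Chars.join sep (xs ++ [u, v]) = PySem.Chars.join sep (xs ++ [u ++ sep ++ v]) := by
  induction xs with
  | nil =>
      simp only [List.nil_append]
      rw [PySem.Chars.join_cons_cons, PySem.Chars.join_singleton, PySem.Chars.join_singleton]
  | cons x t ih =>
      rw [List.cons_append, List.cons_append,
        pv_join_cons_ne_nil sep x (t ++ [u, v]) (by simp),
        pv_join_cons_ne_nil sep x (t ++ [u ++ sep ++ v]) (by simp), ih]

theorem pv_go_join (sep : List Char) (hsep : sep ≠ []) :
    ∀ (fuel : Nat) (l cur : List Char) (acc : List (List Char)), l.length ≤ fuel →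
    PySem.Chars.join sep (PySem.Chars.splitOn.go sep fuel l cur acc)
      = PySem.Chars.join sep (((cur.reverse ++ l) :: acc).reverse) := by
  intro fuel
  induction fuel with
  | zero =>
      intro l cur acc h
      have hl : l = [] := List.eq_nil_of_length_eq_zero (Nat.le_zero.mp h)
      subst hl; rfl
  | succ n ih =>
      intro l cur acc h
      cases l with
      | nil =>
          rw [show PySem.Chars.splitOn.go sep (n+1) [] cur acc = (cur.reverse :: acc).reverse from rfl]
          simp
      | cons c rest =>
          rw [show PySem.Chars.splitOn.go sep (n+1) (c :: rest) cur acc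
              = if sep.isPrefixOf (c :: rest) then
                  PySem.Chars.splitOn.go sep n (List.drop sep.length (c :: rest)) [] (cur.reverse :: acc)
                else PySem.Chars.splitOn.go sep n rest (c :: cur) acc from rfl]
          by_cases hp : sep.isPrefixOf (c :: rest) = true
          · rw [if_pos hp]
            have hpre : sep <+: (c :: rest) := List.isPrefixOf_iff_prefix.mp hp
            obtain ⟨t, ht⟩ := hpre
            have hsl : 1 ≤ sep.length := by
              cases sep with
              | nil => exact absurd rfl hsep
              | cons a s => simp
            have hlen : (List.drop sep.length (c :: rest)).length ≤ n := by
              simp only [List.length_drop]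
              have : (c :: rest).length ≤ n + 1 := h
              omega
            rw [ih _ _ _ hlen]
            have hdrop : List.drop sep.length (c :: rest) = t := by
              rw [← ht, List.drop_left]
            rw [hdrop]
            -- join sep ((t :: cur.reverse :: acc).reverse) = join sep (((cur.reverse ++ (c::rest)) :: acc).reverse)
            simp only [List.reverse_cons, List.reverse_nil, List.nil_append, List.append_assoc]
            rw [show acc.reverse ++ ([cur.reverse] ++ [t]) = acc.reverse ++ [cur.reverse, t] from rfl]
            rw [pv_join_merge sep acc.reverse cur.reverse t, ← ht]
            simp [List.append_assoc]
          · rw [if_neg hp]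
            have hlen : rest.length ≤ n := by
              have : (c :: rest).length ≤ n + 1 := h
              simpa using this
            rw [ih _ _ _ hlen]
            simp

theorem pv_join_splitOn (sep : List Char) (hsep : sep ≠ []) (s : List Char) :
    PySem.Chars.join sep (PySem.Chars.splitOn s sep) = s := by
  rw [show PySem.Chars.splitOn s sep = PySem.Chars.splitOn.go sep (s.length+1) s [] [] from rfl,
    pv_go_join sep hsep (s.length+1) s [] [] (by omega)]
  simp


theorem pv_split_two (r a b : String) (h : PySem.Str.split? r " " = some [a, b]) :
    r.toList = a.toList ++ ' ' :: b.toList := by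
  unfold PySem.Str.split? at h
  unfold PySem.Chars.split? at h
  simp only [show (" ".toList) = [' '] from rfl] at h
  simp only [List.isEmpty_cons] at h
  have h2 := Option.some.inj h
  have hj := pv_join_splitOn [' '] (by simp) r.toList
  rcases hs : PySem.Chars.splitOn r.toList [' '] with _ | ⟨u, _ | ⟨v, _ | _⟩⟩ <;>
    rw [hs] at h2 <;> simp_all
  · obtain ⟨hu, hv⟩ := h2
    rw [PySem.Chars.join_cons_cons, PySem.Chars.join_singleton] at hj
    rw [← hu, ← hv, ← hj]
    simp

theorem pv_parse_inj (r r' : String) (p : String × String)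
    (h : p ∈ pvParse r) (h' : p ∈ pvParse r') : r = r' := by
  have split_of : ∀ (s : String), p ∈ pvParse s → PySem.Str.split? s " " = some [p.1, p.2] := by
    intro s hs
    unfold pvParse at hs
    rcases hx : PySem.Str.split? s " " with _ | ⟨_ | ⟨a, _ | ⟨b, _ | _⟩⟩⟩ <;>
      rw [hx] at hs <;> simp_all <;> simp [← hs]
  have h1 := pv_split_two r p.1 p.2 (split_of r h)
  have h2 := pv_split_two r' p.1 p.2 (split_of r' h')
  exact String.toList_inj.mp (h1.trans h2.symm)

theorem pv_fold_parse {δ : Type} (f : δ → String × String → δ) :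
    ∀ (l : List String) (d : δ),
    l.foldl (fun d r => match pvParse r with | some p => f d p | none => d) d
      = (l.filterMap pvParse).foldl f d := by
  intro l
  induction l with
  | nil => intro d; rfl
  | cons r t ih =>
      intro d
      rcases hp : pvParse r with _ | p <;>
        simp [List.foldl_cons, List.filterMap_cons, hp, ih]

theorem pv_stepA_eq :
    (fun (d : PySem.Dict String (PySem.Set String)) (i : String) =>
      match PySem.Str.split? i " " with
      | some [reporter, reported_id] =>
          d.modify reported_id PySem.Set.empty (fun s => s.add reporter)
      | _ => d)
    = (fun d r => match pvParse r with
        | some p => d.modify p.2 PySem.Set.empty (fun s => s.add p.1)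
        | none => d) := by
  funext d r
  unfold pvParse
  rcases hx : PySem.Str.split? r " " with _ | ⟨_ | ⟨a, _ | ⟨b, _ | _⟩⟩⟩ <;> simp

theorem pv_getD_init {ν : Type} (v d0 : ν) :
    ∀ (l : List String) (d : PySem.Dict String ν) (q : String),
    (l.foldl (fun d i => d.insert i v) d).getD q d0
      = if q ∈ l then v else d.getD q d0 := by
  intro l
  induction l with
  | nil => intro d q; simp
  | cons i t ih =>
      intro d q
      rw [List.foldl_cons, ih]
      by_cases hq : q ∈ t
      · simp [hq]
      · by_cases hqi : q = i <;> simp [hq, hqi, PySem.Dict.getD_insert]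

theorem pv_foldA_getD :
    ∀ (l : List (String × String)) (d : PySem.Dict String (PySem.Set String)) (q : String),
    (l.foldl (fun d p => d.modify p.2 PySem.Set.empty (fun s => s.add p.1)) d).getD q PySem.Set.empty
      = PySem.Set.update (d.getD q PySem.Set.empty)
          ((l.filter (fun p => p.2 == q)).map (fun p => p.1)) := by
  intro l
  induction l with
  | nil => intro d q; simp [PySem.Set.update]
  | cons p t ih =>
      intro d q
      rw [List.foldl_cons, ih, List.filter_cons]
      by_cases hq : p.2 = q
      · simp only [hq, beq_self_eq_true, if_pos, List.map_cons]
        rw [PySem.Dict.getD_modify]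
        simp only [if_pos rfl]
        rfl
      · have : (p.2 == q) = false := beq_eq_false_iff_ne.mpr hq
        simp only [this, if_neg Bool.false_ne_true]
        rw [PySem.Dict.getD_modify]
        simp [Ne.symm hq]

theorem pv_foldB1_getD :
    ∀ (l : List (String × String)) (d : PySem.Dict String Int) (q : String),
    (l.foldl (fun d p => d.modify p.2 0 (· + 1)) d).getD q 0
      = d.getD q 0 + ((l.filter (fun p => p.2 == q)).length : Int) := by
  intro l d q
  rw [show (l.foldl (fun d p => d.modify p.2 0 (· + 1)) d)
      = ((l.map Prod.snd).foldl (fun d x => d.modify x 0 (· + 1)) d) from by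
    rw [List.foldl_map]]
  rw [PySem.Dict.getD_foldl_modify_add_one]
  congr 1
  rw [List.count_eq_countP, List.countP_map, ← List.countP_eq_length_filter]
  rfl

theorem pv_foldB2_getD (banned : PySem.Set String) :
    ∀ (l : List (String × String)) (d : PySem.Dict String Int) (u : String),
    (l.foldl (fun d p => if banned.contains p.2 then d.modify p.1 0 (· + 1) else d) d).getD u 0
      = d.getD u 0 + ((l.filter (fun p => p.1 == u && banned.contains p.2)).length : Int) := by
  intro l
  induction l with
  | nil => intro d u; simp
  | cons p t ih =>
      intro d u
      rw [List.foldl_cons, List.filter_cons]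
      by_cases hb : banned.contains p.2 = true
      · rw [if_pos hb, ih, PySem.Dict.getD_modify]
        by_cases hu : u = p.1
        · have hc : (p.1 == u && banned.contains p.2) = true := by
            rw [hb, hu]; simp
          rw [if_pos hu, hc, if_pos rfl, List.length_cons, hu]
          push_cast
          ring
        · have hc : (p.1 == u && banned.contains p.2) = false := by
            rw [beq_eq_false_iff_ne.mpr (Ne.symm hu), Bool.false_and]
          rw [if_neg hu, hc]
          simp
      · rw [if_neg hb, ih]
        have hc : (p.1 == u && banned.contains p.2) = false := by
          rw [Bool.eq_false_iff.mpr hb, Bool.and_false]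
        rw [hc]
        simp

theorem pv_foldA2_getD (k : Int) :
    ∀ (it : List (String × PySem.Set String)) (c : PySem.Dict String Int) (u : String),
    (it.foldl (fun c p =>
        if k ≤ PySem.Set.len p.2 then
          p.2.foldl (fun c reporter => c.modify reporter 0 (· + 1)) c
        else c) c).getD u 0
      = c.getD u 0 +
        ((it.map (fun p => if k ≤ PySem.Set.len p.2 then (p.2.count u : Int) else 0)).sum) := by
  intro it
  induction it with
  | nil => intro c u; simp
  | cons p t ih =>
      intro c u
      rw [List.foldl_cons, ih, List.map_cons, List.sum_cons]
      by_cases hk : k ≤ PySem.Set.len p.2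
      · rw [if_pos hk, if_pos hk, PySem.Dict.getD_foldl_modify_add_one]
        ring
      · rw [if_neg hk, if_neg hk]
        ring

theorem pv_mem_banned (k : Int) :
    ∀ (it : List (String × Int)) (s0 : PySem.Set String) (x : String),
    x ∈ it.foldl (fun s p => if k ≤ p.2 then s.add p.1 else s) s0
      ↔ x ∈ s0 ∨ ∃ p ∈ it, p.1 = x ∧ k ≤ p.2 := by
  intro it
  induction it with
  | nil => intro s0 x; simp
  | cons p t ih =>
      intro s0 x
      rw [List.foldl_cons]
      by_cases hk : k ≤ p.2
      · rw [if_pos hk, ih]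
        rw [PySem.Set.mem_add]
        constructor
        · rintro ((h | h) | h)
          · exact Or.inl h
          · exact Or.inr ⟨p, List.mem_cons_self, h.symm, hk⟩
          · obtain ⟨q, hq, h1, h2⟩ := h
            exact Or.inr ⟨q, List.mem_cons_of_mem _ hq, h1, h2⟩
        · rintro (h | ⟨q, hq, h1, h2⟩)
          · exact Or.inl (Or.inl h)
          · rcases List.mem_cons.mp hq with rfl | hq'
            · exact Or.inl (Or.inr h1.symm)
            · exact Or.inr ⟨q, hq', h1, h2⟩
      · rw [if_neg hk, ih]
        constructor
        · rintro (h | ⟨q, hq, h1, h2⟩)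
          · exact Or.inl h
          · exact Or.inr ⟨q, List.mem_cons_of_mem _ hq, h1, h2⟩
        · rintro (h | ⟨q, hq, h1, h2⟩)
          · exact Or.inl h
          · rcases List.mem_cons.mp hq with rfl | hq'
            · exact absurd h2 hk
            · exact Or.inr ⟨q, hq', h1, h2⟩


theorem pv_sum_indicator (x : String) :
    ∀ (Q : List String), Q.Nodup → x ∈ Q →
    (Q.map (fun q => if x == q then (1 : Int) else 0)).sum = 1 := by
  intro Q
  induction Q with
  | nil => intro _ h; simp at h
  | cons q t ih =>
      intro hnd hx
      rw [List.map_cons, List.sum_cons]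
      rcases List.mem_cons.mp hx with rfl | hx'
      · simp only [beq_self_eq_true, if_pos]
        have hnot : x ∉ t := (List.nodup_cons.mp hnd).1
        have : (t.map (fun q => if x == q then (1 : Int) else 0)).sum = 0 := by
          rw [List.sum_eq_zero]
          intro y hy
          obtain ⟨q', hq', rfl⟩ := List.mem_map.mp hy
          have : (x == q') = false := beq_eq_false_iff_ne.mpr (fun h => hnot (h ▸ hq'))
          simp [this]
        rw [this]
        norm_num
      · have hne : (x == q) = false := beq_eq_false_iff_ne.mpr
          (fun h => (List.nodup_cons.mp hnd).1 (h ▸ hx'))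
        rw [ih (List.nodup_cons.mp hnd).2 hx']
        simp [hne]

theorem pv_partition (f : String × String → Bool) :
    ∀ (L : List (String × String)) (Q : List String), Q.Nodup →
    (∀ p ∈ L, f p = true → p.2 ∈ Q) →
    (Q.map (fun q => (L.countP (fun p => p.2 == q && f p) : Int))).sum = (L.countP f : Int) := by
  intro L
  induction L with
  | nil => intro Q _ _; simp
  | cons p t ih =>
      intro Q hnd hmem
      have hstep : ∀ q : String,
          (List.countP (fun p' => p'.2 == q && f p') (p :: t) : Int)
            = (List.countP (fun p' => p'.2 == q && f p') t : Int)
              + (if p.2 == q && f p then (1:Int) else 0) := by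
        intro q
        rw [List.countP_cons]
        by_cases h : (p.2 == q && f p) = true <;> simp [h]
      calc (Q.map (fun q => (List.countP (fun p' => p'.2 == q && f p') (p :: t) : Int))).sum
          = (Q.map (fun q => (List.countP (fun p' => p'.2 == q && f p') t : Int)
              + (if p.2 == q && f p then (1:Int) else 0))).sum := by
            exact congrArg List.sum (List.map_congr_left (fun q _ => hstep q))
        _ = (Q.map (fun q => (List.countP (fun p' => p'.2 == q && f p') t : Int))).sum
              + (Q.map (fun q => if p.2 == q && f p then (1:Int) else 0)).sum := by
            exact PySem.List.sum_map_add_int Q _ _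
        _ = (t.countP f : Int) + (if f p then (1:Int) else 0) := by
            rw [ih Q hnd (fun p' hp' => hmem p' (List.mem_cons_of_mem _ hp'))]
            congr 1
            by_cases hf : f p = true
            · have hm := hmem p List.mem_cons_self hf
              rw [if_pos hf]
              rw [show (Q.map (fun q => if p.2 == q && f p then (1:Int) else 0))
                  = (Q.map (fun q => if p.2 == q then (1:Int) else 0)) from
                List.map_congr_left (fun q _ => by simp [hf])]
              exact pv_sum_indicator p.2 Q hnd hm
            · have hf' : f p = false := Bool.eq_false_iff.mpr hf
              simp [hf']
        _ = ((p :: t).countP f : Int) := by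
            rw [List.countP_cons]
            by_cases h : f p = true <;> simp [h]

theorem pv_stepB1_eq :
    (fun (d : PySem.Dict String Int) (r : String) =>
      (PySem.Str.split? r " ").elim d (fun parts =>
        if parts.length = 2 then d.modify (parts.getD 1 "") 0 (· + 1) else d))
    = (fun d r => match pvParse r with
        | some p => d.modify p.2 0 (· + 1)
        | none => d) := by
  funext d r
  unfold pvParse
  rcases hx : PySem.Str.split? r " " with _ | ⟨_ | ⟨a, _ | ⟨b, _ | _⟩⟩⟩ <;> simp

theorem pv_stepB2_eq (banned : PySem.Set String) :
    (fun (d : PySem.Dict String Int) (r : String) =>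
      (PySem.Str.split? r " ").elim d (fun parts =>
        if parts.length = 2 then
          (if banned.contains (parts.getD 1 "") then d.modify (parts.getD 0 "") 0 (· + 1)
           else d)
        else d))
    = (fun d r => match pvParse r with
        | some p => if banned.contains p.2 then d.modify p.1 0 (· + 1) else d
        | none => d) := by
  funext d r
  unfold pvParse
  rcases hx : PySem.Str.split? r " " with _ | ⟨_ | ⟨a, _ | ⟨b, _ | _⟩⟩⟩ <;> simp


theorem pv_keys_init {ν : Type} (v : ν) (l : List String) :
    (l.foldl (fun d i => d.insert i v) PySem.Dict.empty).keys = PySem.Set.ofList l := by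
  rw [PySem.Dict.keys_foldl_insert l (fun _ _ => v), PySem.Dict.keys_empty,
    PySem.Set.ofList_eq_foldl]
  rfl

theorem pv_equal (id_list reports : List String) (k : Int) :
    solution id_list reports k = solution_alt id_list reports k := by
  simp only [solution, solution_alt]
  rw [pv_stepA_eq, pv_stepB1_eq, pv_stepB2_eq, pv_fold_parse, pv_fold_parse, pv_fold_parse]
  set L := (PySem.Set.ofList reports).filterMap pvParse with hL
  -- Nodup of the parsed pair list and of each reporter list
  have hLnd : L.Nodup :=
    List.Nodup.filterMap (fun a a' b hb hb' => pv_parse_inj a a' b hb hb')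
      (PySem.Set.nodup_ofList reports)
  have hRnd : ∀ q : String, ((L.filter (fun p => p.2 == q)).map (fun p => p.1)).Nodup := by
    intro q
    apply List.Nodup.map_on ?_ (hLnd.filter _)
    intro p hp p' hp' hpp
    have h1 : p.2 = q := by simpa using (List.mem_filter.mp hp).2
    have h2 : p'.2 = q := by simpa using (List.mem_filter.mp hp').2
    exact Prod.ext hpp (h1.trans h2.symm)
  apply List.map_congr_left
  intro u hu
  set dA := L.foldl (fun d p => d.modify p.2 PySem.Set.empty (fun s => s.add p.1))
      (id_list.foldl (fun d id => d.insert id PySem.Set.empty) PySem.Dict.empty) with hdA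
  set recvF := L.foldl (fun d p => d.modify p.2 0 (· + 1))
      (id_list.foldl (fun d i => d.insert i (0 : Int)) PySem.Dict.empty) with hrecvF
  set banned := recvF.items.foldl (fun s p => if k ≤ p.2 then s.add p.1 else s)
      PySem.Set.empty with hbanned
  set Q := PySem.Set.update (PySem.Set.ofList id_list) (L.map (fun p => p.2)) with hQ
  have hkA : dA.keys = Q := by
    rw [hdA, PySem.Dict.keys_foldl_modify_key L (fun p => p.2) PySem.Set.empty
      (fun _ p s => s.add p.1), pv_keys_init]
  have hkB : recvF.keys = Q := by
    rw [hrecvF, PySem.Dict.keys_foldl_modify_key L (fun p => p.2) 0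
      (fun _ _ c => c + 1), pv_keys_init]
  have hndQ : Q.Nodup := PySem.Set.nodup_update _ _ (PySem.Set.nodup_ofList id_list)
  have hndA : dA.keys.Nodup := hkA ▸ hndQ
  have hndB : recvF.keys.Nodup := hkB ▸ hndQ
  have hvA : ∀ q, dA.getD q PySem.Set.empty
      = (L.filter (fun p => p.2 == q)).map (fun p => p.1) := by
    intro q
    rw [hdA, pv_foldA_getD, pv_getD_init]
    have h0 : (if q ∈ id_list then PySem.Set.empty
        else PySem.Dict.empty.getD q PySem.Set.empty) = ([] : PySem.Set String) := by
      split_ifs <;> simp [PySem.Dict.getD_empty, PySem.Set.empty]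
    rw [h0, PySem.Set.update_eq_append_of_disjoint _ _ (hRnd q) (by intro x hx; simp)]
    simp
  have hvB : ∀ q, recvF.getD q 0 = ((L.filter (fun p => p.2 == q)).length : Int) := by
    intro q
    rw [hrecvF, pv_foldB1_getD, pv_getD_init]
    split_ifs <;> simp [PySem.Dict.getD_empty]
  have hitB : recvF.items = Q.map (fun q => (q, recvF.getD q 0)) := by
    rw [PySem.Dict.items_eq_map_keys recvF hndB 0, hkB]
  have hbanmem : ∀ x, banned.contains x = true
      ↔ x ∈ Q ∧ k ≤ ((L.filter (fun p => p.2 == x)).length : Int) := by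
    intro x
    rw [PySem.Set.contains_iff, hbanned, hitB, pv_mem_banned]
    simp only [List.mem_map]
    constructor
    · rintro (h | ⟨p, ⟨q, hq, rfl⟩, h1, h2⟩)
      · simp [PySem.Set.empty] at h
      · have h1' : q = x := h1
        subst h1'
        exact ⟨hq, by rw [← hvB q]; exact h2⟩
    · rintro ⟨hxQ, hk⟩
      exact Or.inr ⟨(x, recvF.getD x 0), ⟨x, hxQ, rfl⟩, rfl, by rw [hvB x]; exact hk⟩
  have hQmem : ∀ p ∈ L, p.2 ∈ Q := by
    intro p hp
    rw [hQ, PySem.Set.mem_update]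
    exact Or.inr (List.mem_map_of_mem hp)
  rw [PySem.Dict.items_eq_map_keys dA hndA PySem.Set.empty, hkA, pv_foldA2_getD,
    pv_getD_init, List.map_map, pv_foldB2_getD, pv_getD_init,
    ← List.countP_eq_length_filter]
  have hz : (if u ∈ id_list then (0:Int) else PySem.Dict.empty.getD u 0) = 0 := by
    split_ifs <;> simp [PySem.Dict.getD_empty]
  rw [hz, zero_add, zero_add]
  rw [← pv_partition (fun p => p.1 == u && banned.contains p.2) L Q hndQ
    (fun p hp _ => hQmem p hp)]
  refine congrArg List.sum (List.map_congr_left ?_)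
  intro q hqQ
  simp only [Function.comp]
  rw [hvA q]
  have hlen : PySem.Set.len ((L.filter (fun p => p.2 == q)).map (fun p => p.1))
      = ((L.filter (fun p => p.2 == q)).length : Int) := by
    simp [PySem.Set.len]
  rw [hlen]
  by_cases hk : k ≤ ((L.filter (fun p => p.2 == q)).length : Int)
  · rw [if_pos hk]
    have hcnt : ((((L.filter (fun p => p.2 == q)).map (fun p => p.1)).count u : Nat) : Int)
        = (L.countP (fun p => p.1 == u && p.2 == q) : Int) := by
      rw [List.count_eq_countP, List.countP_map, List.countP_filter]
      rfl
    rw [hcnt]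
    have : L.countP (fun p => p.1 == u && p.2 == q)
        = L.countP (fun p => p.2 == q && (p.1 == u && banned.contains p.2)) := by
      apply List.countP_congr
      intro p hp
      by_cases h2 : p.2 = q
      · have hb : banned.contains p.2 = true :=
          (hbanmem p.2).mpr ⟨hQmem p hp, by rw [h2]; exact hk⟩
        have hbm : q ∈ banned := h2 ▸ (PySem.Set.contains_iff banned p.2).mp hb
        simp [h2, hbm]
      · have h2' : (p.2 == q) = false := beq_eq_false_iff_ne.mpr h2
        simp [h2']
    rw [this]
  · rw [if_neg hk]
    have : L.countP (fun p => p.2 == q && (p.1 == u && banned.contains p.2)) = 0 := by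
      rw [List.countP_eq_zero]
      intro p hp hcon
      obtain ⟨hq2, _, hcb⟩ := by simpa using hcon
      have hle := ((hbanmem p.2).mp ((PySem.Set.contains_iff banned p.2).mpr hcb)).2
      rw [hq2] at hle
      exact hk hle
    rw [this]
    simp

-- ===== VERDICT (by name: the statement is the Claim_ definition above) =====
theorem solution_spec : Claim_equal_solution := by
  intro id_list reports k _ _
  unfold Spec_solution
  exact pv_equal id_list reports k
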